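-- pv_equiv track=rewrite | github.com/rcr095/rcr095 | 210CT_CW/210_Q4Week3Adv1.py | removeDupl
-- ===== SOURCE A (Python) =====
-- def checkLine(cubes):#check if a solution is possible
--     prev = [('#', 0)]
--     for cube in cubes:
--         if cube[0] != prev[0]:
--             prev = cube
--         else:
--             return False
--     return True
--
-- def removeDupl(cubes):#removes the smalled cube in case of a duplicate
--     newList = []
--     i = 0
--     while i < len(cubes) - 1:
--         if cubes[i][0] == cubes[i + 1][0]:
--             newList.append(cubes[i])
--             i += 2
--         else:
--             newList.append(cubes[i])
--             i += 1
--     if checkLine(cubes) == False: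
--         return removeDupl(newList)
--     return cubes
-- ===== SOURCE B (Python) =====
-- def removeDupl(cubes):
--     out = cubes
--     while any(a[0] == b[0] for a, b in zip(out, out[1:])):
--         new, skip = [], False
--         for a, b in zip(out, out[1:]):
--             if skip:
--                 skip = False
--             else:
--                 new.append(a)
--                 skip = (a[0] == b[0])
--         out = new
--     return out
-- ===== Notes on version B (the rewrite author's own statement) =====
-- stated objective: alternative
-- what changed: The outer recursion of removeDupl becomes an iterative fixpoint while-loop, the index-based inner reduction scan becomes a single pass over zip(out, out[1:]) with a skip flag, and the early-return prev-tracking checkLine becomes an any() over adjacent pairs.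
import Mathlib
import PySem

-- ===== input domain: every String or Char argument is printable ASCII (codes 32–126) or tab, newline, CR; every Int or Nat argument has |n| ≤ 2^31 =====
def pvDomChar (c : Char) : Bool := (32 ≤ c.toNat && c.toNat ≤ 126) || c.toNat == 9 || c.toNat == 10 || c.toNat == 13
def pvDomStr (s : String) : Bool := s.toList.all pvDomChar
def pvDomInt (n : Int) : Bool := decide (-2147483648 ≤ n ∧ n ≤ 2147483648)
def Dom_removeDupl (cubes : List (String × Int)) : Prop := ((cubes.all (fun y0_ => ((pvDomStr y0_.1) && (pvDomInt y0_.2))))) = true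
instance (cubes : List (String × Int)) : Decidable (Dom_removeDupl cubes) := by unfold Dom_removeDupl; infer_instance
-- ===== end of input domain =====

-- B replaces A's outer recursion by an iterative fixpoint loop, A's index-based inner scan by a
-- single zip/skip-flag pass, and A's early-return prev-tracking line check by any() over adjacent
-- pairs; same cost, objective: alternative.

-- ===== PORT A =====
-- checkLine's `prev` starts as the sentinel list [('#',0)]; `cube[0] != prev[0]` compares a str
-- with the tuple ('#',0) on the first iteration and is always True there, so `prev` is ported as
-- Option String (none = the sentinel, unequal to every letter); exact on all inputs.
def checkLineGo : Option String → List (String × Int) → Bool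
  | _, [] => true
  | prev, c :: rest => if (some c.1 ≠ prev) then checkLineGo (some c.1) rest else false

def checkLine (cubes : List (String × Int)) : Bool := checkLineGo none cubes

-- the while-loop of removeDupl over the index i; `fuel` is a totality guard only — i grows by
-- ≥ 1 per iteration and the loop runs while i < len - 1, so fuel = cubes.length never runs out
def passA (cubes : List (String × Int)) : Nat → Nat → List (String × Int) → List (String × Int)
  | 0, _, newList => newList
  | fuel + 1, i, newList =>
    if i < cubes.length - 1 then
      if (cubes.getD i ("", 0)).1 == (cubes.getD (i + 1) ("", 0)).1 then
        passA cubes fuel (i + 2) (newList ++ [cubes.getD i ("", 0)])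
      else
        passA cubes fuel (i + 1) (newList ++ [cubes.getD i ("", 0)])
    else newList

-- the recursion of removeDupl; `fuel` is a totality guard only — each recursive call is on a
-- strictly shorter list, so fuel = cubes.length + 1 never runs out
def removeDuplGo : Nat → List (String × Int) → List (String × Int)
  | 0, cubes => cubes
  | fuel + 1, cubes =>
    if checkLine cubes = false then removeDuplGo fuel (passA cubes cubes.length 0 []) else cubes

def removeDupl (cubes : List (String × Int)) : List (String × Int) :=
  removeDuplGo (cubes.length + 1) cubes

-- ===== PORT B =====
-- any(a[0] == b[0] for a, b in zip(out, out[1:]))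
def hasDup (L : List (String × Int)) : Bool :=
  (L.zip (L.drop 1)).any (fun ab => ab.1.1 == ab.2.1)

-- the inner for-loop over zip(out, out[1:]) with the skip flag, state = (new, skip)
def passB (L : List (String × Int)) : List (String × Int) :=
  ((L.zip (L.drop 1)).foldl
    (fun (st : List (String × Int) × Bool) ab =>
      if st.2 then (st.1, false)
      else (st.1 ++ [ab.1], ab.1.1 == ab.2.1))
    ([], false)).1

-- the outer while-loop of B; `fuel` is a totality guard only — every pass shortens the list, so
-- fuel = cubes.length + 1 never runs out
def removeDuplAltGo : Nat → List (String × Int) → List (String × Int)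
  | 0, out => out
  | fuel + 1, out =>
    if hasDup out then removeDuplAltGo fuel (passB out) else out

def removeDupl_alt (cubes : List (String × Int)) : List (String × Int) :=
  removeDuplAltGo (cubes.length + 1) cubes

-- ===== PRECONDITION & SPEC =====
def Spec_removeDupl (cubes : List (String × Int)) (out : List (String × Int)) : Prop := out = removeDupl_alt cubes
instance (cubes : List (String × Int)) (out : List (String × Int)) : Decidable (Spec_removeDupl cubes out) := by unfold Spec_removeDupl; infer_instance

-- ===== CLAIM (what is proved, stated in full; the proofs are below) =====
def Claim_equal_removeDupl : Prop := ∀ (cubes : List (String × Int)), Dom_removeDupl cubes → Spec_removeDupl cubes (removeDupl cubes)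

-- ===== LEMMAS AND PROOFS =====

-- structural characterisation shared by both inner passes
def passSpec : List (String × Int) → List (String × Int)
  | x :: y :: rest => if x.1 = y.1 then x :: passSpec rest else x :: passSpec (y :: rest)
  | _ => []

theorem checkLineGo_some (rest : List (String × Int)) (y : String × Int) :
    checkLineGo (some y.1) rest = !hasDup (y :: rest) := by
  induction rest generalizing y with
  | nil => simp [checkLineGo, hasDup]
  | cons c r ih =>
      simp only [checkLineGo, hasDup, List.drop_succ_cons, List.drop_zero, List.zip_cons_cons,
        List.any_cons] at *
      by_cases h : c.1 = y.1
      · simp [h]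
      · simp [h, Ne.symm h, ih c]

theorem checkLine_eq (L : List (String × Int)) : checkLine L = !hasDup L := by
  cases L with
  | nil => simp [checkLine, checkLineGo, hasDup]
  | cons x r => simpa [checkLine, checkLineGo] using checkLineGo_some r x

theorem passB_foldl (L : List (String × Int)) (acc : List (String × Int)) :
    ((L.zip (L.drop 1)).foldl
      (fun (st : List (String × Int) × Bool) ab =>
        if st.2 then (st.1, false)
        else (st.1 ++ [ab.1], ab.1.1 == ab.2.1))
      (acc, false)).1 = acc ++ passSpec L := by
  induction L using passSpec.induct generalizing acc with
  | case1 x y rest hd ih =>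
      cases rest with
      | nil => simp [passSpec, hd]
      | cons z r =>
          simp only [List.drop_succ_cons, List.drop_zero, List.zip_cons_cons, List.foldl_cons,
            if_neg Bool.false_ne_true, hd, beq_self_eq_true, if_true]
          have := ih (acc ++ [x])
          simp only [List.drop_succ_cons, List.drop_zero] at this ⊢
          rw [this, passSpec, if_pos hd]
          simp
  | case2 x y rest hd ih =>
      have hb : (x.1 == y.1) = false := by simpa using hd
      simp only [List.drop_succ_cons, List.drop_zero, List.zip_cons_cons, List.foldl_cons,
        if_neg Bool.false_ne_true, hb]
      have := ih (acc ++ [x])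
      simp only [List.drop_succ_cons, List.drop_zero] at this ⊢
      rw [this, passSpec, if_neg hd]
      simp
  | case3 L h =>
      match L, h with
      | [], _ => simp [passSpec]
      | [x], _ => simp [passSpec]
      | x :: y :: r, h => exact absurd rfl (fun hh => h x y r hh)

theorem passB_eq (L : List (String × Int)) : passB L = passSpec L := by
  have := passB_foldl L []
  simpa [passB] using this

theorem passSpec_short (L : List (String × Int)) (h : L.length ≤ 1) : passSpec L = [] := by
  match L, h with
  | [], _ => rfl
  | [x], _ => rfl

theorem passA_eq (cubes : List (String × Int)) (fuel i : Nat)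
    (acc : List (String × Int)) (hf : cubes.length - 1 - i ≤ fuel) :
    passA cubes fuel i acc = acc ++ passSpec (cubes.drop i) := by
  induction fuel generalizing i acc with
  | zero =>
      rw [passA, passSpec_short]
      · simp
      · simp only [List.length_drop]; omega
  | succ fuel ih =>
      rw [passA]
      by_cases h : i < cubes.length - 1
      · have h1 : i < cubes.length := by omega
        have h2 : i + 1 < cubes.length := by omega
        have hdrop : cubes.drop i = cubes[i] :: cubes[i+1] :: cubes.drop (i+2) := by
          rw [List.drop_eq_getElem_cons h1, List.drop_eq_getElem_cons h2]
        rw [if_pos h]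
        by_cases hd : (cubes.getD i ("", 0)).1 == (cubes.getD (i + 1) ("", 0)).1
        · have heq : cubes[i].1 = cubes[i+1].1 := by
            rw [List.getD_eq_getElem _ _ h1, List.getD_eq_getElem _ _ h2] at hd
            simpa using hd
          rw [if_pos hd, ih (i + 2) _ (by omega), List.getD_eq_getElem _ _ h1, hdrop, passSpec,
            if_pos heq]
          simp
        · have hne : ¬ cubes[i].1 = cubes[i+1].1 := by
            rw [List.getD_eq_getElem _ _ h1, List.getD_eq_getElem _ _ h2] at hd
            simpa using hd
          rw [if_neg hd, ih (i + 1) _ (by omega), List.getD_eq_getElem _ _ h1, hdrop, passSpec,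
            if_neg hne, ← List.drop_eq_getElem_cons h2]
          simp
      · rw [if_neg h, passSpec_short]
        · simp
        · simp only [List.length_drop]; omega

theorem go_eq (fuel : Nat) (L : List (String × Int)) :
    removeDuplGo fuel L = removeDuplAltGo fuel L := by
  induction fuel generalizing L with
  | zero => rfl
  | succ fuel ih =>
      rw [removeDuplGo, removeDuplAltGo, checkLine_eq]
      cases hd : hasDup L with
      | false => simp
      | true =>
          simp only [Bool.not_true]
          rw [passA_eq L L.length 0 [] (by omega), ih, passB_eq]
          simp

theorem main_eq (cubes : List (String × Int)) : removeDupl cubes = removeDupl_alt cubes :=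
  go_eq (cubes.length + 1) cubes

-- ===== VERDICT (by name: the statement is the Claim_ definition above) =====
theorem removeDupl_spec : Claim_equal_removeDupl := by
  intro cubes _
  unfold Spec_removeDupl
  exact main_eq cubes
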